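-- pv_equiv track=rewrite | github.com/nascarsayan/gfg | interview/01_arrays/16_LHSSmRHSLg.py | lhssrhsl
-- ===== SOURCE A (Python) =====
-- def lhssrhsl(arr, n):
--   rs = [float('inf')]
--   for e in reversed(arr[1:]):
--     rs.insert(0, min(rs[0], e))
--   lg = arr[0]
--   for idx in range(1, len(arr) - 1):
--     if arr[idx] > lg and arr[idx] < rs[idx]:
--       return arr[idx]
--     lg = max(lg, arr[idx])
--   return -1
-- ===== SOURCE B (Python) =====
-- def lhssrhsl(arr, n):
--     # One forward pass, O(1) extra space: keep a tentative candidate (the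
--     # first element greater than everything to its left); drop it as soon as
--     # a later element <= it appears; no element between a dropped candidate
--     # and the point of invalidation can qualify, so no backtracking is needed.
--     lg = arr[0]
--     last = len(arr) - 1
--     cand = None
--     for i in range(1, len(arr)):
--         e = arr[i]
--         if cand is not None and e <= cand:
--             cand = None
--         if cand is None and i < last and e > lg:
--             cand = e
--         if e > lg:
--             lg = e
--     return -1 if cand is None else cand
-- ===== Notes on version B (the rewrite author's own statement) =====
-- stated objective: faster
-- what changed: Replace A's suffix-minimum array (built by quadratic repeated insert(0,...)) plus second scan with a single forward pass and O(1) extra space: a tentative candidate (first element exceeding the running prefix max) that is invalidated when a later element not above it appears; no suffix structure is ever built.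
-- outside the precondition, e.g. on lhssrhsl([], 0): A raises IndexError, B raises IndexError
import Mathlib
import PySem

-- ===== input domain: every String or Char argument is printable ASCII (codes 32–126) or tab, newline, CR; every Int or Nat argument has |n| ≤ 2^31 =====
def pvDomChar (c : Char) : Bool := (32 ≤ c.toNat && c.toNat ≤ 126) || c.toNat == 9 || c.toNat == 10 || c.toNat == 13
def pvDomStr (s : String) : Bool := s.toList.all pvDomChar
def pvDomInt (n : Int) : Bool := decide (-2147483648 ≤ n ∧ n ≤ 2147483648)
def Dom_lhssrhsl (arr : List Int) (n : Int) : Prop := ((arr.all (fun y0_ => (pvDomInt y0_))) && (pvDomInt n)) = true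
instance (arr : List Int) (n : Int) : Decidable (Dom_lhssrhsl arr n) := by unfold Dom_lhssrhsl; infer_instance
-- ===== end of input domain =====

-- B replaces A's suffix-minimum array (built by quadratic repeated insert(0,...)) plus a
-- second scan with a single forward pass keeping a tentative candidate; return values proved equal.

-- ===== PORT A =====
-- rs is a list of optional ints: `none` plays the role of Python's float('inf') sentinel.
def pvStepA (rs : List (Option Int)) (e : Int) : List (Option Int) :=
  (match rs.head? with
   | some (some m) => some (min m e)
   | _ => some e) :: rs

-- the indices of Python's range(1, len(arr) - 1)
def pvLoopA (arr : List Int) (rs : List (Option Int)) : List Nat → Int → Int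
  | [], _ => -1
  | idx :: rest, lg =>
    let e := arr.getD idx 0
    if decide (lg < e) &&
       (match rs.getD idx none with
        | none => true
        | some r => decide (e < r)) then e
    else pvLoopA arr rs rest (max lg e)

def lhssrhsl (arr : List Int) (n : Int) : Int :=
  let rs := ((arr.drop 1).reverse).foldl pvStepA [none]
  pvLoopA arr rs (List.range' 1 (arr.length - 2)) (arr.headD 0)

-- ===== PORT B =====
-- one forward pass over the indices of range(1, len(arr)); cand is Python's `cand` (None = no candidate)
def pvLoopC (arr : List Int) (last : Nat) : List Nat → Int → Option Int → Option Int
  | [], _, cand => cand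
  | i :: rest, lg, cand =>
    let e := arr.getD i 0
    let cand1 : Option Int := match cand with
      | some c => if e ≤ c then none else some c
      | none => none
    -- Python's `if cand is None and i < last and e > lg: cand = e`
    let cand2 : Option Int := match cand1 with
      | none => if i < last ∧ lg < e then some e else none
      | some c => some c
    let lg' := if lg < e then e else lg
    pvLoopC arr last rest lg' cand2

def lhssrhsl_alt (arr : List Int) (n : Int) : Int :=
  match pvLoopC arr (arr.length - 1) (List.range' 1 (arr.length - 1)) (arr.headD 0) none with
  | none => -1
  | some c => c

-- ===== PRECONDITION & SPEC =====
-- Pre_ excludes only the empty list, on which Python A raises IndexError at arr[0].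
def Pre_lhssrhsl (arr : List Int) (n : Int) : Prop := arr ≠ []
instance (arr : List Int) (n : Int) : Decidable (Pre_lhssrhsl arr n) := by unfold Pre_lhssrhsl; infer_instance
def pvWitness_lhssrhsl : List Int × Int := ([1, 3, 2, 5, 4], 5)

def Spec_lhssrhsl (arr : List Int) (n : Int) (out : Int) : Prop := out = lhssrhsl_alt arr n
instance (arr : List Int) (n : Int) (out : Int) : Decidable (Spec_lhssrhsl arr n out) := by unfold Spec_lhssrhsl; infer_instance

-- ===== CLAIM (what is proved, stated in full; the proofs are below) =====
def Claim_equal_lhssrhsl : Prop := ∀ (arr : List Int) (n : Int), Dom_lhssrhsl arr n → Pre_lhssrhsl arr n → Spec_lhssrhsl arr n (lhssrhsl arr n)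

-- ===== LEMMAS AND PROOFS =====

-- reference suffix-minimum of a list (none on the empty list)
def sminOpt : List Int → Option Int
  | [] => none
  | e :: l => some (match sminOpt l with | none => e | some m => if e < m then e else m)

-- reference list of suffix minima: sufSpec l = [min l[0:], min l[1:], …]
def sufSpec : List Int → List Int
  | [] => []
  | e :: l => (match sminOpt l with | none => e | some m => if e < m then e else m) :: sufSpec l

-- intermediate scan: A's loop re-expressed over the suffix-minima list
def midLoop (arr suf : List Int) : List Nat → Int → Int
  | [], _ => -1
  | i :: rest, lg =>
    if decide (lg < arr.getD i 0) && decide (arr.getD i 0 < suf.getD (i + 1) 0) then arr.getD i 0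
    else midLoop arr suf rest (max lg (arr.getD i 0))

lemma sufSpec_length (l : List Int) : (sufSpec l).length = l.length := by
  induction l with
  | nil => rfl
  | cons e t ih => simp [sufSpec, ih]

-- A's fold builds the optional suffix minima of arr[1:] with a trailing `none` (the inf sentinel)
lemma foldA_eq (l : List Int) :
    (l.reverse).foldl pvStepA [none] = (sufSpec l).map some ++ [none] := by
  induction l with
  | nil => rfl
  | cons e t ih =>
    rw [List.reverse_cons, List.foldl_append, ih, List.foldl_cons, List.foldl_nil]
    have hh : ((sufSpec t).map some ++ [(none : Option Int)]).head? = some (sminOpt t) := by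
      cases t with
      | nil => rfl
      | cons f t' => rfl
    unfold pvStepA
    rw [hh]
    cases hs : sminOpt t with
    | none => simp [sufSpec, hs]
    | some m =>
      have hmin : min m e = if e < m then e else m := by split_ifs <;> omega
      simp [sufSpec, hs, hmin]

lemma sufSpec_drop1 (arr : List Int) : sufSpec (arr.drop 1) = (sufSpec arr).drop 1 := by
  cases arr <;> rfl

-- A's loop equals midLoop once rs is (suffix minima of arr[1:]) ++ [none]
lemma loopA_eq_mid (arr suf : List Int) (hlen : suf.length = arr.length) :
    ∀ (idxs : List Nat), (∀ i ∈ idxs, i < arr.length - 1) →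
      ∀ lg, pvLoopA arr ((suf.drop 1).map some ++ [none]) idxs lg = midLoop arr suf idxs lg := by
  intro idxs
  induction idxs with
  | nil => intro _ lg; rfl
  | cons idx rest ih =>
    intro hmem lg
    have hidx0 : idx < suf.length - 1 := by
      rw [hlen]; exact hmem idx (by simp)
    have hidx : idx < (suf.drop 1).length := by
      rw [List.length_drop]; exact hidx0
    have hget : ((suf.drop 1).map some ++ [(none : Option Int)]).getD idx none
        = some (suf.getD (idx + 1) 0) := by
      rw [List.getD_eq_getElem?_getD, List.getElem?_append_left (by simpa using hidx)]
      rw [List.getElem?_map, List.getElem?_drop]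
      have hidx2 : 1 + idx < suf.length := by omega
      rw [List.getElem?_eq_getElem hidx2]
      rw [List.getD_eq_getElem?_getD, List.getElem?_eq_getElem (by omega)]
      simp [Nat.add_comm]
    rw [pvLoopA, midLoop]
    simp only [hget]
    have hrec := ih (fun i hi => hmem i (by simp [hi])) (max lg (arr.getD idx 0))
    cases hc : (decide (lg < arr.getD idx 0) && decide (arr.getD idx 0 < suf.getD (idx + 1) 0)) with
    | true => simp only [if_true]
    | false => simp only [if_false, Bool.false_eq_true, hrec]

-- prefix maximum of arr[0..i-1] (for i ≥ 1)
def pmax (arr : List Int) (i : Nat) : Int := (arr.take i).foldl max (arr.headD 0)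

lemma pmax_succ (arr : List Int) (i : Nat) (h : i < arr.length) :
    pmax arr (i + 1) = max (pmax arr i) (arr.getD i 0) := by
  unfold pmax
  have ht : arr.take (i + 1) = arr.take i ++ [arr[i]] := by
    rw [List.take_succ, List.getElem?_eq_getElem h]; rfl
  rw [ht, List.foldl_append, List.getD_eq_getElem _ _ h]
  simp

lemma pmax_ge (arr : List Int) (j i : Nat) (hj : j < i) (hjl : j < arr.length) :
    arr.getD j 0 ≤ pmax arr i := by
  induction i with
  | zero => omega
  | succ m ih =>
    rcases Nat.lt_succ_iff_lt_or_eq.mp hj with h | h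
    · have hm : j < arr.length := hjl
      calc arr.getD j 0 ≤ pmax arr m := ih h
        _ ≤ pmax arr (m + 1) := by
            rcases Nat.lt_or_ge m arr.length with hm2 | hm2
            · rw [pmax_succ arr m hm2]; exact le_max_left _ _
            · unfold pmax; rw [List.take_of_length_le hm2, List.take_of_length_le (by omega)]
    · subst h
      rw [pmax_succ arr j hjl]; exact le_max_right _ _

lemma pmax_one (arr : List Int) (h : arr ≠ []) : pmax arr 1 = arr.headD 0 := by
  cases arr with
  | nil => simp at h
  | cons a t => simp [pmax, List.take]

-- sufSpec's m-th entry is the minimum of the m-th suffix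
lemma sufSpec_getElem? (l : List Int) (m : Nat) :
    (sufSpec l)[m]? = sminOpt (l.drop m) := by
  induction l generalizing m with
  | nil => simp [sufSpec, sminOpt]
  | cons e t ih =>
    cases m with
    | zero => simp [sufSpec, sminOpt]
    | succ k => simpa [sufSpec] using ih k

lemma sminOpt_lt_iff (l : List Int) (c m : Int) (h : sminOpt l = some m) :
    c < m ↔ ∀ x ∈ l, c < x := by
  induction l generalizing m with
  | nil => simp [sminOpt] at h
  | cons e t ih =>
    cases t with
    | nil =>
      simp [sminOpt] at h
      subst h; simp
    | cons f t' =>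
      obtain ⟨m', hm'⟩ : ∃ m', sminOpt (f :: t') = some m' := by
        simp [sminOpt]
      have hh : m = if e < m' then e else m' := by
        have hsm : sminOpt (e :: f :: t') = some (if e < m' then e else m') := by
          rw [sminOpt, hm']
        rw [hsm] at h
        exact (Option.some_inj.mp h).symm
      have iht := ih m' hm'
      constructor
      · intro hc x hx
        rcases List.mem_cons.mp hx with rfl | hx
        · split_ifs at hh <;> omega
        · have : c < m' := by split_ifs at hh <;> omega
          exact iht.mp this x hx
      · intro hall
        have h1 : c < e := hall e (by simp)
        have h2 : c < m' := iht.mpr (fun x hx => hall x (by simp [hx]))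
        split_ifs at hh <;> omega

-- "element j beats everything to its left, and everything in positions (j, i) beats it"
def localGood (arr : List Int) (i j : Nat) : Prop :=
  pmax arr j < arr.getD j 0 ∧ ∀ k, j < k → k < i → arr.getD j 0 < arr.getD k 0

def fullGood (arr : List Int) (j : Nat) : Prop := localGood arr arr.length j

lemma localGood_mono (arr : List Int) (i i' j : Nat) (h : i ≤ i') :
    localGood arr i' j → localGood arr i j := by
  rintro ⟨h1, h2⟩
  exact ⟨h1, fun k hk1 hk2 => h2 k hk1 (by omega)⟩

-- the midLoop condition at index j equals fullGood arr j (when lg = pmax arr j, j in range)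
lemma cond_iff_fullGood (arr : List Int) (j : Nat) (h1 : 1 ≤ j) (h2 : j + 2 ≤ arr.length) :
    ((decide (pmax arr j < arr.getD j 0) &&
      decide (arr.getD j 0 < (sufSpec arr).getD (j + 1) 0)) = true) ↔ fullGood arr j := by
  have hlen : j + 1 < (sufSpec arr).length := by rw [sufSpec_length]; omega
  obtain ⟨m, hm⟩ : ∃ m, sminOpt (arr.drop (j + 1)) = some m := by
    have hne : arr.drop (j + 1) ≠ [] := by
      intro hc
      have := List.drop_eq_nil_iff.mp hc
      omega
    cases hd : arr.drop (j + 1) with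
    | nil => exact absurd hd hne
    | cons a t => exact ⟨_, rfl⟩
  have hgd : (sufSpec arr).getD (j + 1) 0 = m := by
    rw [List.getD_eq_getElem?_getD, sufSpec_getElem?, hm]; rfl
  have hiff := sminOpt_lt_iff (arr.drop (j + 1)) (arr.getD j 0) m hm
  have hmem : (∀ x ∈ arr.drop (j + 1), arr.getD j 0 < x) ↔
      (∀ k, j < k → k < arr.length → arr.getD j 0 < arr.getD k 0) := by
    constructor
    · intro hall k hk1 hk2
      have hk3 : k - (j + 1) < (arr.drop (j + 1)).length := by
        rw [List.length_drop]; omega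
      have : (arr.drop (j + 1))[k - (j + 1)] = arr[k]'hk2 := by
        rw [List.getElem_drop]; congr 1; omega
      have hx := hall _ (by rw [← this] at *; exact List.getElem_mem hk3)
      rw [this] at hx
      rwa [List.getD_eq_getElem _ _ hk2]
    · intro hall x hx
      obtain ⟨idx, hidx, heq⟩ := List.mem_iff_getElem.mp hx
      have hlen2 : j + 1 + idx < arr.length := by
        have := hidx; rw [List.length_drop] at this; omega
      have : x = arr.getD (j + 1 + idx) 0 := by
        rw [List.getD_eq_getElem _ _ hlen2, ← heq, List.getElem_drop]
      rw [this]
      exact hall _ (by omega) hlen2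
  unfold fullGood localGood
  rw [hgd]
  constructor
  · intro hb
    simp only [Bool.and_eq_true, decide_eq_true_eq] at hb
    exact ⟨hb.1, hmem.mp (hiff.mp hb.2)⟩
  · intro ⟨ha, hb⟩
    simp only [Bool.and_eq_true, decide_eq_true_eq]
    exact ⟨ha, hiff.mpr (hmem.mpr hb)⟩

-- canonical answer description: out is the value at the least fully-good index ≥ i (or -1)
def OutSpec (arr : List Int) (i : Nat) (out : Int) : Prop :=
  (∃ j, i ≤ j ∧ j + 2 ≤ arr.length ∧ fullGood arr j ∧ out = arr.getD j 0 ∧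
    ∀ j', i ≤ j' → j' < j → j' + 2 ≤ arr.length → ¬ fullGood arr j') ∨
  ((∀ j, i ≤ j → j + 2 ≤ arr.length → ¬ fullGood arr j) ∧ out = -1)

lemma OutSpec_unique (arr : List Int) (i : Nat) (o1 o2 : Int)
    (h1 : OutSpec arr i o1) (h2 : OutSpec arr i o2) : o1 = o2 := by
  rcases h1 with ⟨j1, hj1i, hj1l, hg1, ho1, hl1⟩ | ⟨hn1, ho1⟩ <;>
    rcases h2 with ⟨j2, hj2i, hj2l, hg2, ho2, hl2⟩ | ⟨hn2, ho2⟩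
  · have : j1 = j2 := by
      by_contra hne
      rcases Nat.lt_or_ge j1 j2 with h | h
      · exact hl2 j1 hj1i h hj1l hg1
      · exact hl1 j2 hj2i (by omega) hj2l hg2
    subst this; rw [ho1, ho2]
  · exact absurd hg1 (hn2 j1 hj1i hj1l)
  · exact absurd hg2 (hn1 j2 hj2i hj2l)
  · rw [ho1, ho2]

-- A's scan satisfies OutSpec
lemma midLoop_outSpec (arr : List Int) :
    ∀ (m i : Nat) (lg : Int), 1 ≤ i → i + m + 1 = arr.length → lg = pmax arr i →
      OutSpec arr i (midLoop arr (sufSpec arr) (List.range' i m) lg) := by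
  intro m
  induction m with
  | zero =>
    intro i lg hi hlen hlg
    rw [List.range'_zero, midLoop]
    exact Or.inr ⟨fun j hj1 hj2 _ => by omega, rfl⟩
  | succ m ih =>
    intro i lg hi hlen hlg
    rw [List.range'_succ, midLoop]
    subst hlg
    cases hc : (decide (pmax arr i < arr.getD i 0) &&
        decide (arr.getD i 0 < (sufSpec arr).getD (i + 1) 0)) with
    | true =>
      simp only [if_true]
      have hg := (cond_iff_fullGood arr i hi (by omega)).mp hc
      exact Or.inl ⟨i, le_refl i, by omega, hg, rfl, fun j' hj1 hj2 _ _ => by omega⟩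
    | false =>
      simp only [Bool.false_eq_true, if_false]
      have hng : ¬ fullGood arr i := fun hg =>
        by rw [(cond_iff_fullGood arr i hi (by omega)).mpr hg] at hc; exact Bool.true_eq_false.mp hc
      have hmax : max (pmax arr i) (arr.getD i 0) = pmax arr (i + 1) :=
        (pmax_succ arr i (by omega)).symm
      rw [hmax]
      have hrec := ih (i + 1) (pmax arr (i + 1)) (by omega) (by omega) rfl
      rcases hrec with ⟨j, hji, hjl, hg, ho, hl⟩ | ⟨hn, ho⟩
      · exact Or.inl ⟨j, by omega, hjl, hg, ho, fun j' hj1 hj2 hj3 =>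
          if hji' : j' = i then by subst hji'; exact hng
          else hl j' (by omega) hj2 hj3⟩
      · exact Or.inr ⟨fun j hj1 hj2 =>
          if hji' : j = i then by subst hji'; exact hng
          else hn j (by omega) hj2, ho⟩

-- B's loop invariant: cand is the value at the least index so far that is
-- greater than all its left and (so far) below all its right
def candInv (arr : List Int) (i : Nat) (cand : Option Int) : Prop :=
  match cand with
  | none => ∀ j, 1 ≤ j → j < i → j + 2 ≤ arr.length → ¬ localGood arr i j
  | some c => ∃ j, 1 ≤ j ∧ j < i ∧ j + 2 ≤ arr.length ∧ c = arr.getD j 0 ∧ localGood arr i j ∧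
      ∀ j', 1 ≤ j' → j' < j → j' + 2 ≤ arr.length → ¬ localGood arr i j'

lemma loopC_candInv (arr : List Int) :
    ∀ (m i : Nat) (lg : Int) (cand : Option Int), 1 ≤ i → i + m = arr.length →
      lg = pmax arr i → candInv arr i cand →
      candInv arr arr.length (pvLoopC arr (arr.length - 1) (List.range' i m) lg cand) := by
  intro m
  induction m with
  | zero =>
    intro i lg cand hi hlen hlg hinv
    rw [List.range'_zero, pvLoopC]
    have : i = arr.length := by omega
    subst this; exact hinv
  | succ m ih =>
    intro i lg cand hi hlen hlg hinv
    rw [List.range'_succ]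
    simp only [pvLoopC]
    subst hlg
    have hiL : i < arr.length := by omega
    set e := arr.getD i 0 with he
    have hlg' : (if pmax arr i < e then e else pmax arr i) = pmax arr (i + 1) := by
      rw [pmax_succ arr i hiL, ← he]
      split_ifs <;> omega
    rw [hlg']
    apply ih (i + 1) _ _ (by omega) (by omega) rfl
    -- invariant preservation
    cases cand with
    | none =>
      simp only [candInv] at hinv
      by_cases hset : i < arr.length - 1 ∧ pmax arr i < e
      · -- new candidate at index i
        show candInv arr (i + 1)
          (if i < arr.length - 1 ∧ pmax arr i < e then some e else none)
        rw [if_pos hset]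
        simp only [candInv]
        exact ⟨i, hi, by omega, by omega, rfl, ⟨hset.2, fun k hk1 hk2 => by omega⟩,
          fun j' h1 h2 h3 hlg'' => hinv j' h1 h2 h3 (localGood_mono arr i (i+1) j' (by omega) hlg'')⟩
      · show candInv arr (i + 1)
          (if i < arr.length - 1 ∧ pmax arr i < e then some e else none)
        rw [if_neg hset]
        simp only [candInv]
        intro j h1 h2 h3 hlg''
        rcases Nat.lt_succ_iff_lt_or_eq.mp h2 with h | h
        · exact hinv j h1 h h3 (localGood_mono arr i (i+1) j (by omega) hlg'')
        · subst h
          exact hset ⟨by omega, hlg''.1⟩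
    | some c =>
      simp only [candInv] at hinv
      obtain ⟨j0, hj01, hj0i, hj0l, hc, hg0, hleast⟩ := hinv
      by_cases hkill : e ≤ c
      · -- candidate invalidated; nothing before i+1 can be locally good
        show candInv arr (i + 1)
          (match (if e ≤ c then none else some c : Option Int) with
           | none => if i < arr.length - 1 ∧ pmax arr i < e then some e else none
           | some c => some c)
        rw [if_pos hkill]
        have hp0 : arr.getD j0 0 ≤ pmax arr i := pmax_ge arr j0 i hj0i (by omega)
        have hne : ¬ (i < arr.length - 1 ∧ pmax arr i < e) := by
          rintro ⟨-, hlt⟩; omega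
        show candInv arr (i + 1)
          (if i < arr.length - 1 ∧ pmax arr i < e then some e else none)
        rw [if_neg hne]
        simp only [candInv]
        intro j hj1 hj2 hj3 hlg''
        rcases Nat.lt_succ_iff_lt_or_eq.mp hj2 with h | h
        · rcases Nat.lt_trichotomy j j0 with hlt | heq | hgt
          · exact hleast j hj1 hlt hj3 (localGood_mono arr i (i+1) j (by omega) hlg'')
          · subst heq
            have := hlg''.2 i (by omega) (by omega)
            omega
          · -- j0 < j < i: arr[j] > arr[j0] ≥ e = arr[i], contradicting localGood at k = i
            have hp : arr.getD j0 0 ≤ pmax arr j := pmax_ge arr j0 j hgt (by omega)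
            have h2 := hlg''.2 i (by omega) (by omega)
            have h1 := hlg''.1
            omega
        · subst h
          have h1 := hlg''.1
          omega
      · -- candidate survives: e > c
        show candInv arr (i + 1)
          (match (if e ≤ c then none else some c : Option Int) with
           | none => if i < arr.length - 1 ∧ pmax arr i < e then some e else none
           | some c => some c)
        rw [if_neg hkill]
        show candInv arr (i + 1) (some c)
        simp only [candInv]
        refine ⟨j0, hj01, by omega, hj0l, hc, ?_, fun j' ha hb hd hlg'' =>
          hleast j' ha hb hd (localGood_mono arr i (i+1) j' (by omega) hlg'')⟩
        refine ⟨hg0.1, fun k hk1 hk2 => ?_⟩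
        rcases Nat.lt_succ_iff_lt_or_eq.mp hk2 with h | h
        · exact hg0.2 k hk1 h
        · subst h; rw [← hc, ← he]; omega

-- the final candidate satisfies OutSpec at 1
lemma candInv_outSpec (arr : List Int) (copt : Option Int)
    (h : candInv arr arr.length copt) :
    OutSpec arr 1 (copt.getD (-1)) := by
  cases copt with
  | none =>
    simp only [candInv] at h
    exact Or.inr ⟨fun j hj1 hj2 => h j hj1 (by omega) hj2, rfl⟩
  | some c =>
    simp only [candInv] at h
    obtain ⟨j, h1, h2, h3, h4, h5, h6⟩ := h
    exact Or.inl ⟨j, h1, h3, h5, h4, fun j' ha hb hd => h6 j' ha hb hd⟩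

-- ===== VERDICT (by name: the statement is the Claim_ definition above) =====
theorem lhssrhsl_spec : Claim_equal_lhssrhsl := by
  intro arr n _ hpre
  unfold Spec_lhssrhsl
  cases harr : arr with
  | nil => exact absurd harr hpre
  | cons a t =>
    subst harr
    cases t with
    | nil =>
      -- singleton: both loops are empty, both return -1
      simp [lhssrhsl, lhssrhsl_alt, pvLoopA, pvLoopC]
    | cons b t' =>
      set arr := a :: b :: t' with harr
      have hL : 2 ≤ arr.length := by simp [harr]
      have hne : arr ≠ [] := by simp [harr]
      -- A's side
      have hA : lhssrhsl arr n = midLoop arr (sufSpec arr) (List.range' 1 (arr.length - 2)) (arr.headD 0) := by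
        unfold lhssrhsl
        rw [foldA_eq, sufSpec_drop1]
        refine loopA_eq_mid arr (sufSpec arr) (sufSpec_length arr) _ ?_ (arr.headD 0)
        intro i hi
        have := List.mem_range'.mp hi
        omega
      have hAspec : OutSpec arr 1 (lhssrhsl arr n) := by
        rw [hA]
        exact midLoop_outSpec arr (arr.length - 2) 1 (arr.headD 0) (le_refl 1) (by omega)
          (pmax_one arr hne).symm
      -- B's side
      have hBinv : candInv arr arr.length
          (pvLoopC arr (arr.length - 1) (List.range' 1 (arr.length - 1)) (arr.headD 0) none) := by
        refine loopC_candInv arr (arr.length - 1) 1 (arr.headD 0) none (le_refl 1) (by omega)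
          (pmax_one arr hne).symm ?_
        simp only [candInv]
        intro j h1 h2; omega
      have halt : lhssrhsl_alt arr n =
          (pvLoopC arr (arr.length - 1) (List.range' 1 (arr.length - 1)) (arr.headD 0) none).getD (-1) := by
        unfold lhssrhsl_alt
        cases pvLoopC arr (arr.length - 1) (List.range' 1 (arr.length - 1)) (arr.headD 0) none <;> rfl
      have hBspec : OutSpec arr 1 (lhssrhsl_alt arr n) := by
        rw [halt]
        exact candInv_outSpec arr _ hBinv
      exact OutSpec_unique arr 1 _ _ hAspec hBspec
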